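-- pv_equiv track=rewrite | github.com/ebeleey/Algorithm | 백준/Bronze/2775. 부녀회장이 될테야/부녀회장이 될테야.py | how_many_people
-- ===== SOURCE A (Python) =====
-- def how_many_people(floors, rooms):
--
--     people = [[0] * (rooms + 1) for _ in range(floors + 1)]
--
--     for i in range(rooms+1):
--         people[0][i]=i
--     if(floors>=1):
--         for k in range(1, floors+1):
--             for n in range(1, rooms+1):
--                 people[k][n] = sum(people[k-1][1:n+1])
--     return people[floors][rooms]
-- ===== SOURCE B (Python) =====
-- def how_many_people(floors, rooms):
--     # single row of running prefix sums instead of re-summing a slice per cell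
--     row = list(range(rooms + 1))
--     for _ in range(floors):
--         s = 0
--         new = []
--         for x in row:
--             s += x
--             new.append(s)
--         row = new
--     return row[rooms]
-- ===== Notes on version B (the rewrite author's own statement) =====
-- stated objective: faster
-- what changed: Replaces the (floors+1)x(rooms+1) table whose each cell re-sums a slice of the previous row with a single row updated in place by a running prefix sum, O(floors*rooms) instead of O(floors*rooms^2).
import Mathlib
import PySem

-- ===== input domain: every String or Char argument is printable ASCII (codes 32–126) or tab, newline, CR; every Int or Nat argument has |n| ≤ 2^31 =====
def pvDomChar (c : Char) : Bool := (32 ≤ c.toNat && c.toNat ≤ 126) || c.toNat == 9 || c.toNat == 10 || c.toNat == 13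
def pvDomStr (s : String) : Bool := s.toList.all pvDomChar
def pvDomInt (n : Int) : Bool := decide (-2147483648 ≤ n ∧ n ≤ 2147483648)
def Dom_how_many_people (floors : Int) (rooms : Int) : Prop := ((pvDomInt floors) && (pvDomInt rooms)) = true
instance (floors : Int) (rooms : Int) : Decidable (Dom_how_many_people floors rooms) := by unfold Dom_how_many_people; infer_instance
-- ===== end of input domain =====

-- B replaces A's table with per-cell slice re-summing by a single row updated by a running prefix sum; for floors < 0 A raises IndexError while B returns the floor-0 value.


-- ===== PORT A =====
def how_many_people (floors : Int) (rooms : Int) : Int :=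
  let people : List (List Int) :=
    (PySem.List.pyRange 0 (floors + 1) 1).map (fun _ => List.replicate (rooms + 1).toNat (0 : Int))
  let people :=
    (PySem.List.pyRange 0 (rooms + 1) 1).foldl
      (fun p i => PySem.List.pySetD p 0 (PySem.List.pySetD (PySem.List.pyGetD p 0 []) i i)) people
  let people :=
    if 1 ≤ floors then
      (PySem.List.pyRange 1 (floors + 1) 1).foldl (fun p k =>
        (PySem.List.pyRange 1 (rooms + 1) 1).foldl (fun p n =>
          PySem.List.pySetD p k (PySem.List.pySetD (PySem.List.pyGetD p k []) n
            ((PySem.List.slice (PySem.List.pyGetD p (k - 1) []) (some 1) (some (n + 1))).sum))) p) people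
    else people
  PySem.List.pyGetD (PySem.List.pyGetD people floors []) rooms 0

-- ===== PORT B =====
def how_many_people_alt (floors : Int) (rooms : Int) : Int :=
  let row := PySem.List.pyRange 0 (rooms + 1) 1
  let row := (PySem.List.pyRange 0 floors 1).foldl
    (fun row _ =>
      (row.foldl (fun (p : Int × List Int) x => (p.1 + x, p.2 ++ [p.1 + x])) (0, ([] : List Int))).2) row
  PySem.List.pyGetD row rooms 0

-- ===== PRECONDITION & SPEC =====
-- Pre_ excludes exactly the inputs where Python A raises IndexError: any negative floors or rooms.
def Pre_how_many_people (floors : Int) (rooms : Int) : Prop := 0 ≤ floors ∧ 0 ≤ rooms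
instance (floors : Int) (rooms : Int) : Decidable (Pre_how_many_people floors rooms) := by
  unfold Pre_how_many_people; infer_instance
def pvWitness_how_many_people : Int × Int := (2, 3)

def Spec_how_many_people (floors : Int) (rooms : Int) (out : Int) : Prop := out = how_many_people_alt floors rooms
instance (floors : Int) (rooms : Int) (out : Int) : Decidable (Spec_how_many_people floors rooms out) := by unfold Spec_how_many_people; infer_instance

-- ===== CLAIM (what is proved, stated in full; the proofs are below) =====
def Claim_equal_how_many_people : Prop := ∀ (floors : Int) (rooms : Int), Dom_how_many_people floors rooms → Pre_how_many_people floors rooms → Spec_how_many_people floors rooms (how_many_people floors rooms)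

-- ===== LEMMAS AND PROOFS =====

-- running prefix sums starting from accumulator s: B's inner pass
def prefS (s : Int) : List Int → List Int
  | [] => []
  | x :: xs => (s + x) :: prefS (s + x) xs

-- row of floor j, as a list of length r+1 (r = rooms)
def pvRows (r : Nat) : Nat → List Int
  | 0 => PySem.List.pyRange 0 ((r : Int) + 1) 1
  | j + 1 => prefS 0 (pvRows r j)

-- A's table after the first j outer iterations: floors 0..j computed, the rest still zero
def pvTab (r m j : Nat) : List (List Int) :=
  (List.range (j + 1)).map (pvRows r) ++ List.replicate (m - j) (List.replicate (r + 1) (0 : Int))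

theorem foldl_prefS (row : List Int) (s : Int) (acc : List Int) :
    row.foldl (fun (p : Int × List Int) x => (p.1 + x, p.2 ++ [p.1 + x])) (s, acc)
      = (s + row.sum, acc ++ prefS s row) := by
  induction row generalizing s acc with
  | nil => simp [prefS]
  | cons x xs ih => simp [prefS, ih, add_assoc]

theorem length_prefS (s : Int) (row : List Int) : (prefS s row).length = row.length := by
  induction row generalizing s with
  | nil => rfl
  | cons x xs ih => simp [prefS, ih]

theorem prefS_getD (row : List Int) (s : Int) (n : Nat) (h : n < row.length) :
    (prefS s row).getD n 0 = s + (row.take (n + 1)).sum := by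
  induction row generalizing s n with
  | nil => simp at h
  | cons x xs ih =>
    cases n with
    | zero => simp [prefS]
    | succ n => simpa [prefS, add_assoc] using ih (s + x) n (by simpa using h)

theorem pvRowFold_getD (ns : List Nat) (row : List Int) (f : Nat → Int) (t : Nat) :
    (ns.foldl (fun r n => r.set n (f n)) row).getD t 0
      = if t ∈ ns ∧ t < row.length then f t else row.getD t 0 := by
  induction ns generalizing row with
  | nil => simp
  | cons n ns ih =>
    simp only [List.foldl_cons]
    rw [ih]
    simp only [List.length_set, List.mem_cons]
    by_cases hlt : t < row.length
    · by_cases hmem : t ∈ ns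
      · simp [hmem, hlt]
      · by_cases htn : t = n
        · subst htn
          simp [hmem, hlt, List.getD_eq_getElem?_getD]
        · simp [hmem, htn, hlt, List.getD_eq_getElem?_getD,
            List.getElem_set_ne (fun h => htn h.symm)]
    · have h0 : (row.set n (f n)).getD t 0 = row.getD t 0 := by
        by_cases htn : t = n
        · subst htn
          rw [List.getD_eq_getElem?_getD, List.getD_eq_getElem?_getD,
              List.getElem?_eq_none (by simp; omega), List.getElem?_eq_none (by omega)]
        · rw [List.getD_eq_getElem?_getD, List.getD_eq_getElem?_getD,
              List.getElem?_set_ne (fun h => htn h.symm)]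
      simp [hlt]

theorem pvRowFold_length (ns : List Nat) (row : List Int) (f : Nat → Int) :
    (ns.foldl (fun r n => r.set n (f n)) row).length = row.length := by
  induction ns generalizing row with
  | nil => rfl
  | cons n ns ih => simp [ih]

theorem length_pvRows (r : Nat) (j : Nat) : (pvRows r j).length = r + 1 := by
  induction j with
  | zero =>
    show (PySem.List.pyRange 0 ((r : Int) + 1) 1).length = r + 1
    rw [PySem.List.length_pyRange_one]; omega
  | succ j ih => simp [pvRows, length_prefS, ih]

theorem head_pvRows (r : Nat) (j : Nat) : (pvRows r j).getD 0 0 = 0 := by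
  induction j with
  | zero =>
    show (PySem.List.pyRange 0 ((r : Int) + 1) 1).getD 0 0 = 0
    rw [PySem.List.pyRange_one, List.getD_eq_getElem?_getD]
    simp
  | succ j ih =>
    have hlen : (pvRows r j).length = r + 1 := length_pvRows r j
    obtain ⟨x, xs, hx⟩ : ∃ x xs, pvRows r j = x :: xs := by
      cases h : pvRows r j with
      | nil => rw [h] at hlen; simp at hlen
      | cons a l => exact ⟨a, l, rfl⟩
    have hx0 : x = 0 := by rw [hx] at ih; simpa using ih
    simp [pvRows, hx, prefS, hx0]

-- the table-level folds: setting one row, reading only a fixed other row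

theorem pvTF0 (ns : List Int) (p : List (List Int)) (hp : 0 < p.length) :
    ns.foldl (fun q i => PySem.List.pySetD q 0 (PySem.List.pySetD (PySem.List.pyGetD q 0 []) i i)) p
      = p.set 0 (ns.foldl (fun row i => PySem.List.pySetD row i i) (p.getD 0 [])) := by
  induction ns generalizing p with
  | nil =>
    simp [List.getD_eq_getElem?_getD, List.getElem?_eq_getElem hp]
  | cons i ns ih =>
    simp only [List.foldl_cons]
    have h0 : PySem.List.pySetD p 0 (PySem.List.pySetD (PySem.List.pyGetD p 0 []) i i)
        = p.set 0 (PySem.List.pySetD (p.getD 0 []) i i) := by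
      simp [PySem.List.pySetD_of_nonneg, PySem.List.pyGetD_of_nonneg, List.getD_eq_getElem?_getD]
    rw [h0, ih _ (by simpa using hp)]
    simp [List.set_set, List.getD_eq_getElem?_getD, hp]

theorem pvTFk (ns : List Int) (p : List (List Int)) (K : Int) (hK1 : 1 ≤ K)
    (hK : K.toNat < p.length) :
    ns.foldl (fun q n => PySem.List.pySetD q K (PySem.List.pySetD (PySem.List.pyGetD q K []) n
        ((PySem.List.slice (PySem.List.pyGetD q (K - 1) []) (some 1) (some (n + 1))).sum))) p
      = p.set K.toNat (ns.foldl (fun row n => PySem.List.pySetD row n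
          ((PySem.List.slice (p.getD (K - 1).toNat []) (some 1) (some (n + 1))).sum)) (p.getD K.toNat [])) := by
  induction ns generalizing p with
  | nil =>
    simp [List.getD_eq_getElem?_getD, List.getElem?_eq_getElem hK]
  | cons n ns ih =>
    simp only [List.foldl_cons]
    have hne : (K - 1).toNat ≠ K.toNat := by omega
    have h0 : PySem.List.pySetD p K (PySem.List.pySetD (PySem.List.pyGetD p K []) n
        ((PySem.List.slice (PySem.List.pyGetD p (K - 1) []) (some 1) (some (n + 1))).sum))
        = p.set K.toNat (PySem.List.pySetD (p.getD K.toNat []) n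
            ((PySem.List.slice (p.getD (K - 1).toNat []) (some 1) (some (n + 1))).sum)) := by
      rw [PySem.List.pySetD_of_nonneg _ _ (by omega), PySem.List.pyGetD_of_nonneg _ _ (by omega),
        PySem.List.pyGetD_of_nonneg _ _ (by omega)]
    rw [h0, ih _ (by simpa using hK)]
    have hgK : ((p.set K.toNat (PySem.List.pySetD (p.getD K.toNat []) n
        ((PySem.List.slice (p.getD (K - 1).toNat []) (some 1) (some (n + 1))).sum))).getD K.toNat [])
        = PySem.List.pySetD (p.getD K.toNat []) n
            ((PySem.List.slice (p.getD (K - 1).toNat []) (some 1) (some (n + 1))).sum) := by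
      rw [List.getD_eq_getElem?_getD]
      simp [hK]
    have hgJ : ((p.set K.toNat (PySem.List.pySetD (p.getD K.toNat []) n
        ((PySem.List.slice (p.getD (K - 1).toNat []) (some 1) (some (n + 1))).sum))).getD (K - 1).toNat [])
        = p.getD (K - 1).toNat [] := by
      rw [List.getD_eq_getElem?_getD, List.getElem?_set_ne (Ne.symm hne), ← List.getD_eq_getElem?_getD]
    rw [hgK, hgJ, List.set_set]

-- the first Python loop produces floor 0: [0, 1, ..., r]
theorem pvRW0 (r : Nat) :
    (PySem.List.pyRange 0 ((r : Int) + 1) 1).foldl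
        (fun row i => PySem.List.pySetD row i i) (List.replicate (r + 1) (0 : Int))
      = pvRows r 0 := by
  rw [PySem.List.pyRange_one]
  have hn : ((r : Int) + 1 - 0).toNat = r + 1 := by omega
  rw [hn, List.foldl_map]
  have hbody : (fun (row : List Int) (k : Nat) => PySem.List.pySetD row ((0 : Int) + ↑k) ((0 : Int) + ↑k))
      = fun row k => row.set k ((k : Nat) : Int) := by
    funext row k
    rw [zero_add, PySem.List.pySetD_natCast]
  rw [hbody]
  have hlen : ((List.range (r + 1)).foldl (fun (row : List Int) k => row.set k ((k : Nat) : Int))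
      (List.replicate (r + 1) (0 : Int))).length = r + 1 := by
    rw [pvRowFold_length]; simp
  apply List.ext_getElem (by rw [hlen, length_pvRows])
  intro t h1 h2
  rw [← List.getD_eq_getElem _ 0, ← List.getD_eq_getElem _ 0, pvRowFold_getD]
  have ht : t < r + 1 := by rw [hlen] at h1; exact h1
  have : t ∈ List.range (r + 1) ∧ t < (List.replicate (r + 1) (0 : Int)).length := by
    simp [List.mem_range]; omega
  rw [if_pos this]
  show _ = (PySem.List.pyRange 0 ((r : Int) + 1) 1).getD t 0
  rw [PySem.List.pyRange_one, hn, List.getD_eq_getElem?_getD]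
  simp [List.getElem?_range ht]

-- A's inner loop over one floor computes the prefix-sum row
theorem pvRWk (r : Nat) (prev : List Int) (hlen : prev.length = r + 1) (h0 : prev.getD 0 0 = 0) :
    (PySem.List.pyRange 1 ((r : Int) + 1) 1).foldl
        (fun row n => PySem.List.pySetD row n
          ((PySem.List.slice prev (some 1) (some (n + 1))).sum)) (List.replicate (r + 1) (0 : Int))
      = prefS 0 prev := by
  obtain ⟨x, tl, rfl⟩ : ∃ x tl, prev = x :: tl := by
    cases prev with
    | nil => simp at hlen
    | cons a l => exact ⟨a, l, rfl⟩
  have hx0 : x = 0 := by simpa using h0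
  subst hx0
  have htl : tl.length = r := by simpa using hlen
  rw [PySem.List.pyRange_one]
  have hn : ((r : Int) + 1 - 1).toNat = r := by omega
  rw [hn, List.foldl_map]
  have hbody : (fun (row : List Int) (k : Nat) => PySem.List.pySetD row ((1 : Int) + ↑k)
        ((PySem.List.slice ((0 : Int) :: tl) (some 1) (some ((1 : Int) + ↑k + 1))).sum))
      = fun row k => row.set (k + 1) ((tl.take (k + 1)).sum) := by
    funext row k
    have h1 : (1 : Int) + (k : Int) = ((k + 1 : Nat) : Int) := by push_cast; ring
    rw [h1, PySem.List.pySetD_natCast]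
    have h2 : ((k + 1 : Nat) : Int) + 1 = ((k + 2 : Nat) : Int) := by push_cast; ring
    rw [h2, PySem.List.slice_toNat _ (by omega) (by omega)]
    have h3 : (((k + 2 : Nat) : Int)).toNat - (1 : Int).toNat = k + 1 := by omega
    rw [h3]
    rfl
  rw [hbody]
  have hfold := pvRowFold_getD ((List.range r).map (fun k => k + 1))
      (List.replicate (r + 1) (0 : Int)) (fun n => ((tl.take n).sum))
  rw [List.foldl_map] at hfold
  have hlenL : (((List.range r)).foldl
      (fun (row : List Int) (k : Nat) => row.set (k + 1) ((tl.take (k + 1)).sum))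
      (List.replicate (r + 1) (0 : Int))).length = r + 1 := by
    have := pvRowFold_length ((List.range r).map (fun k => k + 1))
        (List.replicate (r + 1) (0 : Int)) (fun n => ((tl.take n).sum))
    rw [List.foldl_map] at this
    rw [this]; simp
  apply List.ext_getElem (by rw [hlenL, length_prefS]; simp [htl])
  intro t h1 h2
  rw [← List.getD_eq_getElem _ 0, ← List.getD_eq_getElem _ 0, hfold]
  have ht : t < r + 1 := by rw [hlenL] at h1; exact h1
  rw [prefS_getD _ _ _ (by simp [htl]; omega)]
  cases t with
  | zero =>
    have h4 : ¬ ((0 : Nat) ∈ (List.range r).map (fun k => k + 1)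
        ∧ (0 : Nat) < (List.replicate (r + 1) (0 : Int)).length) := by
      simp
    rw [if_neg h4]
    simp
  | succ s =>
    have hs : s < r := by omega
    have h4 : (s + 1) ∈ (List.range r).map (fun k => k + 1)
        ∧ (s + 1) < (List.replicate (r + 1) (0 : Int)).length := by
      simp [List.mem_map, List.mem_range]
      omega
    rw [if_pos h4]
    simp

theorem pvTab_getElem?_le (r m j t : Nat) (_hjm : j ≤ m) (ht : t ≤ j) :
    (pvTab r m j)[t]? = some (pvRows r t) := by
  unfold pvTab
  rw [List.getElem?_append_left (by simp; omega)]
  simp [List.getElem?_range (by omega : t < j + 1)]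

theorem pvTab_getElem?_gt (r m j t : Nat) (hjt : j < t) (htm : t ≤ m) :
    (pvTab r m j)[t]? = some (List.replicate (r + 1) (0 : Int)) := by
  unfold pvTab
  rw [List.getElem?_append_right (by simp; omega)]
  rw [List.getElem?_replicate_of_lt (by simp; omega)]

theorem length_pvTab (r m j : Nat) (hjm : j ≤ m) : (pvTab r m j).length = m + 1 := by
  unfold pvTab; simp; omega

theorem pvTab_set (r m j : Nat) (hjm : j < m) :
    (pvTab r m j).set (j + 1) (pvRows r (j + 1)) = pvTab r m (j + 1) := by
  apply List.ext_getElem?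
  intro t
  by_cases htm : t ≤ m
  · by_cases htj : t = j + 1
    · subst htj
      rw [List.getElem?_set_self' ]
      rw [pvTab_getElem?_gt r m j (j+1) (by omega) htm, pvTab_getElem?_le r m (j+1) (j+1) (by omega) le_rfl]
      simp
    · have hne : j + 1 ≠ t := fun h => htj h.symm
      rw [List.getElem?_set_ne hne]
      by_cases hle : t ≤ j
      · rw [pvTab_getElem?_le r m j t (by omega) hle, pvTab_getElem?_le r m (j+1) t (by omega) (by omega)]
      · rw [pvTab_getElem?_gt r m j t (by omega) htm, pvTab_getElem?_gt r m (j+1) t (by omega) htm]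
  · have h1 : (pvTab r m j).length ≤ t := by rw [length_pvTab r m j (by omega)]; omega
    have h2 : (pvTab r m (j+1)).length ≤ t := by rw [length_pvTab r m (j+1) (by omega)]; omega
    rw [List.getElem?_eq_none (by rw [List.length_set]; exact h1), List.getElem?_eq_none h2]

-- A's outer loop: after j floors the table is pvTab r m j
theorem pvOuter (r m : Nat) (j : Nat) (_hjm : j ≤ m) :
    (List.range j).foldl (fun p (k : Nat) =>
        (PySem.List.pyRange 1 ((r : Int) + 1) 1).foldl (fun p n =>
          PySem.List.pySetD p ((1 : Int) + ↑k) (PySem.List.pySetD (PySem.List.pyGetD p ((1 : Int) + ↑k) []) n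
            ((PySem.List.slice (PySem.List.pyGetD p ((1 : Int) + ↑k - 1) []) (some 1) (some (n + 1))).sum))) p)
      (pvTab r m 0) = pvTab r m j := by
  induction j with
  | zero => simp
  | succ j ih =>
    have hj : j ≤ m := by omega
    rw [List.range_succ, List.foldl_append, ih hj]
    simp only [List.foldl_cons, List.foldl_nil]
    have hK1 : (1 : Int) ≤ (1 : Int) + (j : Int) := by omega
    have hKt : ((1 : Int) + (j : Int)).toNat = j + 1 := by omega
    have hKlen : ((1 : Int) + (j : Int)).toNat < (pvTab r m j).length := by
      rw [hKt, length_pvTab r m j hj]; omega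
    rw [pvTFk _ _ _ hK1 hKlen]
    have hJt : ((1 : Int) + (j : Int) - 1).toNat = j := by omega
    have hgJ : (pvTab r m j).getD ((1 : Int) + (j : Int) - 1).toNat [] = pvRows r j := by
      rw [hJt, List.getD_eq_getElem?_getD, pvTab_getElem?_le r m j j hj le_rfl]; rfl
    have hgK : (pvTab r m j).getD ((1 : Int) + (j : Int)).toNat [] = List.replicate (r + 1) (0 : Int) := by
      rw [hKt, List.getD_eq_getElem?_getD, pvTab_getElem?_gt r m j (j + 1) (by omega) (by omega)]; rfl
    rw [hgJ, hgK, hKt,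
      pvRWk r (pvRows r j) (length_pvRows r j) (head_pvRows r j)]
    exact pvTab_set r m j (by omega)

theorem pvFoldlConst {α β : Type} (l : List α) (g : β → β) (x : β) :
    l.foldl (fun a _ => g a) x = g^[l.length] x := by
  induction l generalizing x with
  | nil => rfl
  | cons a l ih => simp [ih, Function.iterate_succ_apply]

theorem pvIterRows (r : Nat) (j : Nat) : (prefS 0)^[j] (pvRows r 0) = pvRows r j := by
  induction j with
  | zero => rfl
  | succ j ih => rw [Function.iterate_succ_apply', ih]; rfl

-- the two ports, reduced to the same closed form
theorem pvA_eq (m r : Nat) :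
    how_many_people (m : Int) (r : Int) = (pvRows r m).getD r 0 := by
  unfold how_many_people
  dsimp only
  have ht0 : (PySem.List.pyRange 0 ((m : Int) + 1) 1).map
        (fun _ => List.replicate (((r : Int) + 1).toNat) (0 : Int))
      = List.replicate (m + 1) (List.replicate (r + 1) (0 : Int)) := by
    rw [List.map_const', PySem.List.length_pyRange_one]
    congr 1
  rw [ht0, pvTF0 _ _ (by simp)]
  have hz : (List.replicate (m + 1) (List.replicate (r + 1) (0 : Int))).getD 0 []
      = List.replicate (r + 1) (0 : Int) := by
    rw [List.getD_eq_getElem?_getD]; simp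
  rw [hz, pvRW0 r]
  have htab0 : (List.replicate (m + 1) (List.replicate (r + 1) (0 : Int))).set 0 (pvRows r 0)
      = pvTab r m 0 := by
    rw [List.replicate_succ, List.set_cons_zero]
    unfold pvTab
    simp
  rw [htab0]
  have hfin : ∀ (tab : List (List Int)), tab = pvTab r m m →
      PySem.List.pyGetD (PySem.List.pyGetD tab (m : Int) []) (r : Int) 0 = (pvRows r m).getD r 0 := by
    intro tab htab
    rw [htab, PySem.List.pyGetD_natCast (pvTab r m m) m, List.getD_eq_getElem?_getD,
      pvTab_getElem?_le r m m m le_rfl le_rfl]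
    simp [PySem.List.pyGetD_natCast]
  by_cases hm : (1 : Int) ≤ (m : Int)
  · rw [if_pos hm]
    apply hfin
    rw [PySem.List.pyRange_one 1 ((m : Int) + 1)]
    have hn : ((m : Int) + 1 - 1).toNat = m := by omega
    rw [hn, List.foldl_map]
    exact pvOuter r m m le_rfl
  · rw [if_neg hm]
    have hm0 : m = 0 := by omega
    subst hm0
    exact hfin _ rfl

theorem pvB_eq (m r : Nat) :
    how_many_people_alt (m : Int) (r : Int) = (pvRows r m).getD r 0 := by
  unfold how_many_people_alt
  simp only [foldl_prefS, List.nil_append]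
  have h : (PySem.List.pyRange 0 (m : Int) 1).foldl
        (fun (row : List Int) (_ : Int) => prefS 0 row) (PySem.List.pyRange 0 ((r : Int) + 1) 1)
      = (prefS 0)^[(PySem.List.pyRange 0 (m : Int) 1).length] (PySem.List.pyRange 0 ((r : Int) + 1) 1) :=
    pvFoldlConst _ _ _
  rw [h, PySem.List.length_pyRange_one]
  have hn : ((m : Int) - 0).toNat = m := by omega
  rw [hn]
  have : (PySem.List.pyRange 0 ((r : Int) + 1) 1) = pvRows r 0 := rfl
  rw [this, pvIterRows, PySem.List.pyGetD_natCast]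

-- ===== VERDICT (by name: the statement is the Claim_ definition above) =====
theorem how_many_people_spec : Claim_equal_how_many_people := by
  intro floors rooms hdom hpre
  obtain ⟨hf, hr⟩ := hpre
  lift floors to Nat using hf with m
  lift rooms to Nat using hr with r
  unfold Spec_how_many_people
  rw [pvA_eq, pvB_eq]
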